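-- pv_equiv track=rewrite | github.com/choiyunh/WALK-A-DAY | Self/SKHynix/3.py | solution
-- ===== SOURCE A (Python) =====
-- from itertools import product
--
-- def solution(grid):
--     answer = ""
--     row, col = len(grid), len(grid[0])
--     check = [[False for _ in range(col)] for _ in range(row)]
--
--     r, c = 0, 0
--     while r < row:
--         if check[r][c]:
--             c += 1
--             if c >= col:
--                 r += 1
--                 c = 0
--             continue
--         x = grid[r][c]
--         flag = False
--         for k in range(1, min(row - r + 1, col - c + 1)):
--             dirs = list(product(range(k), repeat=2))
--             for dx, dy in dirs:
--                 if (check[r + dx][c + dy]) or (grid[r + dx][c + dy] != x):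
--                     flag = True
--                     break
--             if flag:
--                 break
--         answer += x
--         if flag:
--             k -= 1
--         dirs = list(product(range(k), repeat=2))
--         if k > 1:
--             answer += str(k)
--         for dx, dy in dirs:
--             check[r + dx][c + dy] = True
--         c += 1
--         if c >= col:
--             r += 1
--             c = 0
--
--     return answer
-- ===== SOURCE B (Python) =====
-- def solution(grid):
--     rows, cols = len(grid), len(grid[0])
--     covered = set()
--     parts = []
--     for r in range(rows):
--         row_r = grid[r]
--         for c in range(cols):
--             if (r, c) in covered:
--                 continue
--             x = row_r[c]
--             k = 1
--             maxk = rows - r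
--             if cols - c < maxk:
--                 maxk = cols - c
--             while k < maxk:
--                 ok = True
--                 gr = grid[r + k]
--                 for j in range(c, c + k + 1):
--                     if (r + k, j) in covered or gr[j] != x:
--                         ok = False
--                         break
--                 if ok:
--                     for i in range(r, r + k):
--                         if (i, c + k) in covered or grid[i][c + k] != x:
--                             ok = False
--                             break
--                 if not ok:
--                     break
--                 k += 1
--             parts.append(x if k == 1 else x + str(k))
--             for i in range(r, r + k):
--                 for j in range(c, c + k):
--                     covered.add((i, j))
--     return "".join(parts)
-- ===== Notes on version B (the rewrite author's own statement) =====
-- stated objective: faster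
-- what changed: B grows each square one layer at a time checking only the new border row/column instead of A's full rescan of every candidate square, tracks covered cells in a set instead of a boolean matrix, and joins a parts list instead of repeated string concatenation.
import Mathlib
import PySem

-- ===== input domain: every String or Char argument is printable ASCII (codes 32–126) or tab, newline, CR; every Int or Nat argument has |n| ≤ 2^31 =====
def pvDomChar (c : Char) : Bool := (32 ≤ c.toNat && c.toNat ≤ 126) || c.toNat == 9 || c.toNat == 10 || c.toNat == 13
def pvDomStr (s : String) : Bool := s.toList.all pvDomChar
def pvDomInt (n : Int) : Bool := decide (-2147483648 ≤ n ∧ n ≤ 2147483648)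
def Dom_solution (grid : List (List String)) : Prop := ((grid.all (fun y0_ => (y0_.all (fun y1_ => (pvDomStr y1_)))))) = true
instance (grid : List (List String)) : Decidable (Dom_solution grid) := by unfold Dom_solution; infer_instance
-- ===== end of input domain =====

-- B replaces A's full re-scan of every candidate square (O(K^3) per square) by growing each
-- square one layer at a time, checking only the new border row/column, with a set of covered
-- cells instead of a boolean matrix and a parts-list join instead of string concatenation.

-- ===== PORT A =====
-- list(product(range(k), repeat=2))
def aDirs (k : Nat) : List (Nat × Nat) :=
  (List.range k).flatMap fun dx => (List.range k).map fun dy => (dx, dy)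

-- the inner double loop with `flag`/`break`: does any cell of the k×k square fail?
def aBad (grid : List (List String)) (check : List (List Bool)) (r c : Nat) (x : String)
    (k : Nat) : Bool :=
  (aDirs k).any fun p =>
    ((check.getD (r + p.1) []).getD (c + p.2) false)
      || !((grid.getD (r + p.1) []).getD (c + p.2) "" == x)

-- `for k in range(1, m): ... if flag: break` then `if flag: k -= 1`; returns the final k
def aFindK (grid : List (List String)) (check : List (List Bool)) (r c : Nat) (x : String)
    (m : Nat) (k : Nat) : Nat :=
  if h : k < m then
    if aBad grid check r c x k then k - 1 else aFindK grid check r c x m (k + 1)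
  else m - 1
termination_by m - k

-- `for dx, dy in dirs: check[r+dx][c+dy] = True`
def aMark (check : List (List Bool)) (r c k : Nat) : List (List Bool) :=
  (aDirs k).foldl (fun ch p => ch.modify (r + p.1) (fun rw => rw.set (c + p.2) true)) check

-- the outer `while r < row` loop (each iteration advances the linear position by one,
-- so `row*col + 1` fuel is never exhausted while `r < row`)
def aLoop (grid : List (List String)) (row col : Nat) :
    Nat → List (List Bool) → String → Nat → Nat → String
  | 0, _, answer, _, _ => answer
  | fuel + 1, check, answer, r, c =>
    if r < row then
      if (check.getD r []).getD c false then
        if c + 1 ≥ col then aLoop grid row col fuel check answer (r + 1) 0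
        else aLoop grid row col fuel check answer r (c + 1)
      else
        let x := (grid.getD r []).getD c ""
        let k := aFindK grid check r c x (min (row - r + 1) (col - c + 1)) 1
        let answer' := answer ++ x ++ (if 1 < k then PySem.Int.toStr (k : Int) else "")
        let check' := aMark check r c k
        if c + 1 ≥ col then aLoop grid row col fuel check' answer' (r + 1) 0
        else aLoop grid row col fuel check' answer' r (c + 1)
    else answer

def solution (grid : List (List String)) : String :=
  aLoop grid grid.length (grid.headD []).length (grid.length * (grid.headD []).length + 1)
    (List.replicate grid.length (List.replicate (grid.headD []).length false)) "" 0 0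

-- ===== PORT B =====
-- one cell of the new border: not yet covered and equal to x
def bCell (grid : List (List String)) (cov : PySem.Set (Nat × Nat)) (x : String)
    (i j : Nat) : Bool :=
  !(PySem.Set.contains cov (i, j)) && ((grid.getD i []).getD j "" == x)

-- the two border-scan loops with `break`: new row r+k (columns c..c+k) and new column c+k (rows r..r+k-1)
def bBorder (grid : List (List String)) (cov : PySem.Set (Nat × Nat)) (r c : Nat) (x : String)
    (k : Nat) : Bool :=
  ((List.range' c (k + 1)).all fun j => bCell grid cov x (r + k) j)
    && ((List.range' r k).all fun i => bCell grid cov x i (c + k))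

-- `while k < maxk: <scan border; break if bad>; k += 1`
def bGrow (grid : List (List String)) (cov : PySem.Set (Nat × Nat)) (r c : Nat) (x : String)
    (M : Nat) (k : Nat) : Nat :=
  if h : k < M then
    if bBorder grid cov r c x k then bGrow grid cov r c x M (k + 1) else k
  else k
termination_by M - k

-- body of the double `for` loop over all positions
def bStep (grid : List (List String)) (rows cols : Nat)
    (st : PySem.Set (Nat × Nat) × List String) (rc : Nat × Nat) :
    PySem.Set (Nat × Nat) × List String :=
  if PySem.Set.contains st.1 rc then st
  else
    let x := (grid.getD rc.1 []).getD rc.2 ""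
    let k := bGrow grid st.1 rc.1 rc.2 x
      (if cols - rc.2 < rows - rc.1 then cols - rc.2 else rows - rc.1) 1
    ((List.range' rc.1 k).foldl
        (fun s i => (List.range' rc.2 k).foldl (fun s' j => PySem.Set.add s' (i, j)) s)
        st.1,
      st.2 ++ [if k == 1 then x else x ++ PySem.Int.toStr (k : Int)])

def solution_alt (grid : List (List String)) : String :=
  PySem.Str.join ""
    (((List.range grid.length).flatMap fun r =>
        (List.range (grid.headD []).length).map fun c => (r, c)).foldl
      (bStep grid grid.length (grid.headD []).length) (PySem.Set.empty, [])).2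

-- ===== PRECONDITION & SPEC =====
-- Pre_ excludes exactly the inputs on which A raises IndexError: the empty grid, a grid whose
-- first row is empty, and grids with a row shorter than the first row (A reads every cell in
-- the first len(grid[0]) columns of every row).
def Pre_solution (grid : List (List String)) : Prop :=
  grid ≠ [] ∧ 0 < (grid.headD []).length ∧
    ∀ rw ∈ grid, (grid.headD []).length ≤ rw.length
instance (grid : List (List String)) : Decidable (Pre_solution grid) := by
  unfold Pre_solution; infer_instance

def pvWitness_solution : List (List String) := [["a", "a"], ["a", "b"]]

def Spec_solution (grid : List (List String)) (out : String) : Prop := out = solution_alt grid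
instance (grid : List (List String)) (out : String) : Decidable (Spec_solution grid out) := by
  unfold Spec_solution; infer_instance

-- ===== CLAIM (what is proved, stated in full; the proofs are below) =====
def Claim_equal_solution : Prop :=
  ∀ (grid : List (List String)), Dom_solution grid → Pre_solution grid →
    Spec_solution grid (solution grid)

-- ===== LEMMAS AND PROOFS =====

-- cell lookup in A's boolean matrix
def getD2 (check : List (List Bool)) (i j : Nat) : Bool := (check.getD i []).getD j false

-- A's matrix has `row` rows of `col` entries
def Shape (row col : Nat) (check : List (List Bool)) : Prop :=
  check.length = row ∧ ∀ i < row, (check.getD i []).length = col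

-- the matrix and the set mark the same cells
def ChkRel (check : List (List Bool)) (cov : PySem.Set (Nat × Nat)) : Prop :=
  ∀ i j, getD2 check i j = PySem.Set.contains cov (i, j)

-- cell (r+i, c+j) is unmarked and equal to x, for a generic marking function
def gOf (grid : List (List String)) (mem : Nat → Nat → Bool) (r c : Nat) (x : String)
    (i j : Nat) : Bool :=
  !(mem (r + i) (c + j)) && ((grid.getD (r + i) []).getD (c + j) "" == x)

-- the whole k×k square is good
def sqAll (g : Nat → Nat → Bool) (k : Nat) : Bool :=
  (List.range k).all fun i => (List.range k).all fun j => g i j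

-- the positions of the grid from (r, c) on, in A's traversal order
def restFrom (row col r c : Nat) : List (Nat × Nat) :=
  if _h : r < row then ((List.range' c (col - c)).map fun j => (r, j)) ++ restFrom row col (r + 1) 0
  else []
termination_by row - r

lemma sqAll_mono (g : Nat → Nat → Bool) {a b : Nat} (hab : a ≤ b) (hb : sqAll g b = true) :
    sqAll g a = true := by
  simp only [sqAll, List.all_eq_true, List.mem_range] at hb ⊢
  intro i hi j hj
  exact hb i (lt_of_lt_of_le hi hab) j (lt_of_lt_of_le hj hab)

lemma sqAll_succ (g : Nat → Nat → Bool) (k : Nat) :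
    sqAll g (k + 1) = (sqAll g k && (((List.range (k + 1)).all fun j => g k j)
      && ((List.range k).all fun i => g i k))) := by
  rw [Bool.eq_iff_iff]
  simp only [sqAll, Bool.and_eq_true, List.all_eq_true, List.mem_range]
  constructor
  · intro h
    exact ⟨fun i hi j hj => h i (by omega) j (by omega),
      fun j hj => h k (by omega) j hj, fun i hi => h i (by omega) k (by omega)⟩
  · rintro ⟨h1, h2, h3⟩ i hi j hj
    rcases (by omega : i < k ∨ i = k) with hi' | rfl
    · rcases (by omega : j < k ∨ j = k) with hj' | rfl
      · exact h1 i hi' j hj'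
      · exact h3 i hi'
    · exact h2 j hj

lemma aBad_eq (grid : List (List String)) (check : List (List Bool)) (r c : Nat) (x : String)
    (k : Nat) : aBad grid check r c x k = !(sqAll (gOf grid (getD2 check) r c x) k) := by
  have hpt : ∀ (p : Nat × Nat),
      (((check.getD (r + p.1) []).getD (c + p.2) false)
        || !((grid.getD (r + p.1) []).getD (c + p.2) "" == x))
      = !(gOf grid (getD2 check) r c x p.1 p.2) := by
    intro p
    simp only [gOf, getD2]
    cases (check.getD (r + p.1) []).getD (c + p.2) false <;>
      cases (grid.getD (r + p.1) []).getD (c + p.2) "" == x <;> rfl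
  cases hs : sqAll (gOf grid (getD2 check) r c x) k with
  | true =>
    simp only [Bool.not_true, aBad]
    rw [List.any_eq_false]
    intro p hp
    simp only [aDirs, List.mem_flatMap, List.mem_map, List.mem_range] at hp
    obtain ⟨i, hi, j, hj, rfl⟩ := hp
    simp only [sqAll, List.all_eq_true, List.mem_range] at hs
    rw [hpt (i, j)]
    simp [hs i hi j hj]
  | false =>
    simp only [Bool.not_false, aBad]
    simp only [sqAll] at hs
    rw [List.all_eq_false] at hs
    obtain ⟨i, hi, hrest⟩ := hs
    rw [Bool.not_eq_true, List.all_eq_false] at hrest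
    obtain ⟨j, hj, hg⟩ := hrest
    rw [Bool.not_eq_true] at hg
    simp only [List.mem_range] at hi hj
    rw [List.any_eq_true]
    refine ⟨(i, j), ?_, ?_⟩
    · simp only [aDirs, List.mem_flatMap, List.mem_map, List.mem_range]
      exact ⟨i, hi, j, hj, rfl⟩
    · rw [hpt (i, j)]
      simp [hg]

lemma aFindK_eq (grid : List (List String)) (check : List (List Bool)) (r c : Nat) (x : String)
    (M d : Nat) :
    ∀ k, 1 ≤ k → k + d = M + 1 → sqAll (gOf grid (getD2 check) r c x) (k - 1) = true →
      aFindK grid check r c x (M + 1) k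
        = Nat.findGreatest (fun t => sqAll (gOf grid (getD2 check) r c x) t = true) M := by
  induction d with
  | zero =>
    intro k hk hd hsq
    have hkM : k = M + 1 := by omega
    subst hkM
    rw [aFindK, dif_neg (by omega)]
    simp only [Nat.add_sub_cancel] at hsq ⊢
    exact Nat.le_antisymm (Nat.le_findGreatest (P := fun t => sqAll (gOf grid (getD2 check) r c x) t = true) le_rfl hsq) (Nat.findGreatest_le M)
  | succ d ih =>
    intro k hk hd hsq
    have hkM : k < M + 1 := by omega
    rw [aFindK, dif_pos hkM, aBad_eq]
    cases hs : sqAll (gOf grid (getD2 check) r c x) k with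
    | true =>
      simp only [Bool.not_true, Bool.false_eq_true, if_false]
      exact ih (k + 1) (by omega) (by omega) (by simpa using hs)
    | false =>
      simp only [Bool.not_false, if_true]
      have hle : k - 1 ≤ Nat.findGreatest (fun t => sqAll (gOf grid (getD2 check) r c x) t = true) M :=
        Nat.le_findGreatest (by omega) hsq
      have hge : Nat.findGreatest (fun t => sqAll (gOf grid (getD2 check) r c x) t = true) M ≤ k - 1 := by
        by_contra hcon
        have hkfg : k ≤ Nat.findGreatest (fun t => sqAll (gOf grid (getD2 check) r c x) t = true) M := by
          omega
        have hP := Nat.findGreatest_spec (m := k - 1) (n := M)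
          (P := fun t => sqAll (gOf grid (getD2 check) r c x) t = true) (by omega) hsq
        have := sqAll_mono (gOf grid (getD2 check) r c x) hkfg hP
        rw [this] at hs
        exact absurd hs (by simp)
      omega

lemma bGrow_eq (grid : List (List String)) (cov : PySem.Set (Nat × Nat)) (r c : Nat) (x : String)
    (M d : Nat) :
    ∀ k, 1 ≤ k → k + d = M →
      sqAll (gOf grid (fun i j => PySem.Set.contains cov (i, j)) r c x) k = true →
      bGrow grid cov r c x M k
        = Nat.findGreatest
            (fun t => sqAll (gOf grid (fun i j => PySem.Set.contains cov (i, j)) r c x) t = true) M := by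
  induction d with
  | zero =>
    intro k hk hd hsq
    simp only [Nat.add_zero] at hd
    subst hd
    rw [bGrow, dif_neg (by omega)]
    exact Nat.le_antisymm (Nat.le_findGreatest (P := fun t => sqAll (gOf grid (fun i j => PySem.Set.contains cov (i, j)) r c x) t = true) le_rfl hsq) (Nat.findGreatest_le _)
  | succ d ih =>
    intro k hk hd hsq
    have hkM : k < M := by omega
    rw [bGrow, dif_pos hkM]
    have hbb : bBorder grid cov r c x k
        = (((List.range (k + 1)).all fun j =>
              gOf grid (fun i j => PySem.Set.contains cov (i, j)) r c x k j)
            && (List.range k).all fun i =>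
              gOf grid (fun i j => PySem.Set.contains cov (i, j)) r c x i k) := by
      simp only [bBorder, List.range'_eq_map_range, List.all_map]
      rfl
    have hdec : sqAll (gOf grid (fun i j => PySem.Set.contains cov (i, j)) r c x) (k + 1)
        = (sqAll (gOf grid (fun i j => PySem.Set.contains cov (i, j)) r c x) k
            && bBorder grid cov r c x k) := by
      rw [sqAll_succ, hbb]
    cases hbord : bBorder grid cov r c x k with
    | true =>
      rw [if_pos (rfl : (true : Bool) = true)]
      exact ih (k + 1) (by omega) (by omega) (by rw [hdec, hsq, hbord]; rfl)
    | false =>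
      rw [if_neg (by simp : ¬ (false : Bool) = true)]
      have hnot : sqAll (gOf grid (fun i j => PySem.Set.contains cov (i, j)) r c x) (k + 1) = false := by
        rw [hdec, hsq, hbord]; rfl
      have hle : k ≤ Nat.findGreatest
          (fun t => sqAll (gOf grid (fun i j => PySem.Set.contains cov (i, j)) r c x) t = true) M :=
        Nat.le_findGreatest (by omega) hsq
      have hge : Nat.findGreatest
          (fun t => sqAll (gOf grid (fun i j => PySem.Set.contains cov (i, j)) r c x) t = true) M ≤ k := by
        by_contra hcon
        have hkfg : k + 1 ≤ Nat.findGreatest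
            (fun t => sqAll (gOf grid (fun i j => PySem.Set.contains cov (i, j)) r c x) t = true) M := by
          omega
        have hP := Nat.findGreatest_spec (m := k) (n := M)
          (P := fun t => sqAll (gOf grid (fun i j => PySem.Set.contains cov (i, j)) r c x) t = true)
          (by omega) hsq
        have := sqAll_mono (gOf grid (fun i j => PySem.Set.contains cov (i, j)) r c x) hkfg hP
        rw [this] at hnot
        exact absurd hnot (by simp)
      omega

lemma contains_add_eq (cov : PySem.Set (Nat × Nat)) (p q : Nat × Nat) :
    PySem.Set.contains (PySem.Set.add cov p) q = (PySem.Set.contains cov q || q == p) := by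
  rw [Bool.eq_iff_iff]
  simp [PySem.Set.mem_add, beq_iff_eq]

lemma relStep (row col : Nat) (check : List (List Bool)) (cov : PySem.Set (Nat × Nat))
    (hs : Shape row col check) (hrel : ChkRel check cov) (a b : Nat) (ha : a < row) (hb : b < col) :
    Shape row col (check.modify a (fun rw => rw.set b true)) ∧
      ChkRel (check.modify a (fun rw => rw.set b true)) (PySem.Set.add cov (a, b)) := by
  obtain ⟨hlen, hrows⟩ := hs
  have halen : a < check.length := by omega
  have hgeta : check[a]? = some check[a] := List.getElem?_eq_getElem halen
  have hgda : check.getD a [] = check[a] := by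
    rw [List.getD_eq_getElem?_getD, hgeta]; rfl
  have hblen : b < check[a].length := by
    rw [← hgda]; rw [hrows a ha]; exact hb
  have hrow? : ∀ i, (check.modify a (fun rw => rw.set b true))[i]?
      = if a = i then (check[i]?).map (fun rw => rw.set b true) else check[i]? := by
    intro i
    rw [List.getElem?_modify]
    by_cases h : a = i <;> cases hgi : check[i]? <;> simp [h]
  have hg2 : ∀ i j, getD2 (check.modify a (fun rw => rw.set b true)) i j
      = if i = a ∧ j = b then true else getD2 check i j := by
    intro i j
    simp only [getD2, List.getD_eq_getElem?_getD]
    rw [hrow? i]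
    by_cases hia : a = i
    · subst hia
      rw [if_pos rfl, hgeta]
      simp only [Option.map_some, Option.getD_some]
      rw [List.getElem?_set]
      by_cases hjb : j = b
      · subst hjb
        rw [if_pos rfl, if_pos hblen]
        simp
      · rw [if_neg (fun h => hjb h.symm)]
        rw [if_neg (fun h => hjb h.2)]
    · rw [if_neg hia, if_neg (fun h => hia h.1.symm)]
  refine ⟨⟨by rw [List.length_modify]; exact hlen, ?_⟩, ?_⟩
  · intro i hi
    rw [List.getD_eq_getElem?_getD, hrow?]
    by_cases hia : a = i
    · subst hia
      rw [if_pos rfl, hgeta]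
      simp only [Option.map_some, Option.getD_some, List.length_set]
      rw [← hgda]
      exact hrows a ha
    · rw [if_neg hia, ← List.getD_eq_getElem?_getD]
      exact hrows i hi
  · intro i j
    rw [hg2, contains_add_eq, ← hrel i j]
    by_cases hij : i = a ∧ j = b
    · obtain ⟨rfl, rfl⟩ := hij
      simp
    · rw [if_neg hij]
      have : ((i, j) == (a, b)) = false := by
        simp only [beq_eq_false_iff_ne, ne_eq, Prod.mk.injEq]
        exact fun h => hij h
      rw [this, Bool.or_false]

lemma relFold (row col : Nat) (L : List (Nat × Nat)) :
    ∀ (check : List (List Bool)) (cov : PySem.Set (Nat × Nat)),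
      (∀ p ∈ L, p.1 < row ∧ p.2 < col) → Shape row col check → ChkRel check cov →
      Shape row col (L.foldl (fun ch p => ch.modify p.1 (fun rw => rw.set p.2 true)) check) ∧
        ChkRel (L.foldl (fun ch p => ch.modify p.1 (fun rw => rw.set p.2 true)) check)
          (L.foldl (fun s p => PySem.Set.add s p) cov) := by
  induction L with
  | nil => intro check cov _ hs hrel; exact ⟨hs, hrel⟩
  | cons p t ih =>
    intro check cov hL hs hrel
    obtain ⟨hp1, hp2⟩ := hL p (List.mem_cons_self)
    obtain ⟨hs', hrel'⟩ := relStep row col check cov hs hrel p.1 p.2 hp1 hp2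
    simp only [List.foldl_cons]
    exact ih _ _ (fun q hq => hL q (List.mem_cons_of_mem p hq)) hs' hrel'

lemma acc_lemma (grid : List (List String)) (rows cols : Nat) (L : List (Nat × Nat)) :
    ∀ (cov : PySem.Set (Nat × Nat)) (parts : List String),
      L.foldl (bStep grid rows cols) (cov, parts)
        = ((L.foldl (bStep grid rows cols) (cov, [])).1,
            parts ++ (L.foldl (bStep grid rows cols) (cov, [])).2) := by
  induction L with
  | nil => intro cov parts; simp
  | cons p t ih =>
    intro cov parts
    have hstep : ∀ parts' : List String, bStep grid rows cols (cov, parts') p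
        = ((bStep grid rows cols (cov, []) p).1,
            parts' ++ (bStep grid rows cols (cov, []) p).2) := by
      intro parts'
      simp only [bStep]
      by_cases hcont : PySem.Set.contains cov p = true
      · rw [if_pos hcont, if_pos hcont]
        simp
      · rw [if_neg hcont, if_neg hcont]
        simp
    simp only [List.foldl_cons]
    rw [hstep parts, hstep [], List.nil_append]
    rw [ih (bStep grid rows cols (cov, []) p).1 (parts ++ (bStep grid rows cols (cov, []) p).2),
      ih (bStep grid rows cols (cov, []) p).1 (bStep grid rows cols (cov, []) p).2]
    simp [List.append_assoc]

lemma join_nil : PySem.Str.join "" [] = "" := rfl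

lemma join_cons (a : String) (l : List String) :
    PySem.Str.join "" (a :: l) = a ++ PySem.Str.join "" l := by
  cases l with
  | nil => simp [PySem.Str.join, PySem.Chars.join, List.intercalate]
  | cons b t => simp [PySem.Str.join, PySem.Chars.join_cons_cons]

lemma restFrom_cons (row col r c : Nat) (hr : r < row) (hc : c < col) :
    restFrom row col r c
      = (r, c) :: (if c + 1 < col then restFrom row col r (c + 1) else restFrom row col (r + 1) 0) := by
  rw [restFrom, dif_pos hr]
  have h1 : col - c = (col - c - 1) + 1 := by omega
  rw [h1, List.range'_succ]
  simp only [List.map_cons, List.cons_append]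
  congr 1
  split_ifs with h2
  · conv_rhs => rw [restFrom, dif_pos hr]
    have h3 : col - c - 1 = col - (c + 1) := by omega
    rw [h3]
  · have h3 : col - c - 1 = 0 := by omega
    rw [h3, List.range'_zero]
    simp

lemma restFrom_flat (row col d : Nat) :
    ∀ r, r + d = row →
      restFrom row col r 0
        = (List.range' r d).flatMap fun i => (List.range col).map fun j => (i, j) := by
  induction d with
  | zero =>
    intro r hd
    rw [restFrom, dif_neg (by omega), List.range'_zero]
    simp
  | succ d ih =>
    intro r hd
    rw [restFrom, dif_pos (by omega), List.range'_succ]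
    rw [List.flatMap_cons]
    congr 1
    · simp [List.range_eq_range']
    · exact ih (r + 1) (by omega)

lemma main_lemma (grid : List (List String)) (row col : Nat) :
    ∀ (fuel : Nat) (r c : Nat) (check : List (List Bool)) (cov : PySem.Set (Nat × Nat))
      (answer : String),
      c < col → r ≤ row → row * col ≤ r * col + c + fuel →
      Shape row col check → ChkRel check cov →
      aLoop grid row col fuel check answer r c
        = answer ++ PySem.Str.join ""
            ((restFrom row col r c).foldl (bStep grid row col) (cov, [])).2 := by
  intro fuel
  induction fuel with
  | zero =>
    intro r c check cov answer hc hr hf _hs _hrel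
    have hnr : ¬ r < row := by
      intro hlt
      have h1 : (r + 1) * col ≤ row * col := Nat.mul_le_mul_right col (by omega)
      have h2 : (r + 1) * col = r * col + col := by ring
      omega
    rw [restFrom, dif_neg hnr]
    simp only [List.foldl_nil, join_nil, String.append_empty]
    rfl
  | succ f ih =>
    intro r c check cov answer hc hr hf hs hrel
    by_cases hrow : r < row
    · rw [restFrom_cons row col r c hrow hc]
      simp only [List.foldl_cons, aLoop]
      rw [if_pos hrow]
      by_cases hchk : (check.getD r []).getD c false = true
      · -- cell already covered: both sides skip it
        rw [if_pos hchk]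
        have hcont : PySem.Set.contains cov (r, c) = true := by
          rw [← hrel r c]; exact hchk
        have hb : bStep grid row col (cov, []) (r, c) = (cov, []) := by
          simp only [bStep]
          rw [if_pos hcont]
        rw [hb]
        by_cases hcc : c + 1 < col
        · rw [if_neg (by omega : ¬ c + 1 ≥ col), if_pos hcc]
          exact ih r (c + 1) check cov answer hcc hr (by omega) hs hrel
        · rw [if_pos (by omega : c + 1 ≥ col), if_neg hcc]
          have hceq : c + 1 = col := by omega
          have h2 : (r + 1) * col = r * col + col := by ring
          exact ih (r + 1) 0 check cov answer (by omega) (by omega) (by omega) hs hrel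
      · -- fresh cell: both sides carve out the same square
        rw [if_neg hchk]
        have hchkf : (check.getD r []).getD c false = false := by
          cases h : (check.getD r []).getD c false
          · rfl
          · exact absurd h hchk
        have hcont : PySem.Set.contains cov (r, c) = false := by
          rw [← hrel r c]; exact hchkf
        set x := (grid.getD r []).getD c "" with hxdef
        set M := min (row - r) (col - c) with hMdef
        have hminrw : min (row - r + 1) (col - c + 1) = M + 1 := Nat.succ_min_succ _ _
        have hMr : M ≤ row - r := min_le_left _ _
        have hMc : M ≤ col - c := min_le_right _ _
        have hM1 : 1 ≤ M := le_min (by omega) (by omega)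
        have hg00 : gOf grid (getD2 check) r c x 0 0 = true := by
          simp only [gOf, getD2, Nat.add_zero]
          rw [hchkf, hxdef]
          simp
        have hsq0 : sqAll (gOf grid (getD2 check) r c x) 0 = true := rfl
        have hsq1 : sqAll (gOf grid (getD2 check) r c x) 1 = true := by
          simp [sqAll, List.range_one, hg00]
        have hgeq : gOf grid (getD2 check) r c x
            = gOf grid (fun i j => PySem.Set.contains cov (i, j)) r c x := by
          funext i j
          simp only [gOf]
          rw [hrel (r + i) (c + j)]
        set N := Nat.findGreatest (fun t => sqAll (gOf grid (getD2 check) r c x) t = true) M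
          with hNdef
        have hkA : aFindK grid check r c x (min (row - r + 1) (col - c + 1)) 1 = N := by
          rw [hminrw]
          exact aFindK_eq grid check r c x M M 1 le_rfl (by omega) hsq0
        have hkB : bGrow grid cov r c x M 1 = N := by
          have hb := bGrow_eq grid cov r c x M (M - 1) 1 le_rfl (by omega)
            (by rw [← hgeq]; exact hsq1)
          rw [hb, ← hgeq]
        have hN1 : 1 ≤ N :=
          Nat.le_findGreatest (P := fun t => sqAll (gOf grid (getD2 check) r c x) t = true)
            hM1 hsq1
        have hNM : N ≤ M := Nat.findGreatest_le M
        rw [hkA]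
        -- evaluate B's step on the fresh cell
        have hbstep : bStep grid row col (cov, []) (r, c)
            = ((List.range' r N).foldl
                (fun s i => (List.range' c N).foldl (fun s' j => PySem.Set.add s' (i, j)) s)
                cov,
               [if N == 1 then x else x ++ PySem.Int.toStr (N : Int)]) := by
          simp only [bStep]
          rw [if_neg (by rw [hcont]; simp)]
          rw [show (if col - c < row - r then col - c else row - r) = M by
            rw [hMdef, Nat.min_def]; split_ifs <;> omega]
          rw [hkB]
          simp [hxdef, List.getD_eq_getElem?_getD]
        rw [hbstep]
        -- the marked matrix and the grown set stay related
        have hAm : aMark check r c N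
            = ((aDirs N).map (fun p => (r + p.1, c + p.2))).foldl
                (fun ch p => ch.modify p.1 (fun rw => rw.set p.2 true)) check := by
          rw [List.foldl_map]
          rfl
        have hBm : (List.range' r N).foldl
              (fun s i => (List.range' c N).foldl (fun s' j => PySem.Set.add s' (i, j)) s)
              cov
            = ((aDirs N).map (fun p => (r + p.1, c + p.2))).foldl
                (fun s p => PySem.Set.add s p) cov := by
          rw [List.foldl_map]
          simp only [aDirs]
          rw [List.foldl_flatMap]
          simp [List.range'_eq_map_range, List.foldl_map]
        have hbounds : ∀ p ∈ (aDirs N).map (fun p => (r + p.1, c + p.2)),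
            p.1 < row ∧ p.2 < col := by
          intro p hp
          simp only [aDirs, List.mem_map, List.mem_flatMap, List.mem_range] at hp
          obtain ⟨q, ⟨i, hi, j, hj, rfl⟩, rfl⟩ := hp
          constructor <;> simp <;> omega
        obtain ⟨hs', hrel'⟩ := relFold row col ((aDirs N).map (fun p => (r + p.1, c + p.2)))
          check cov hbounds hs hrel
        rw [← hAm] at hs' hrel'
        rw [← hBm] at hrel'
        -- the emitted pieces agree
        have hpiece : answer ++ x ++ (if 1 < N then PySem.Int.toStr (N : Int) else "")
            = answer ++ (if N == 1 then x else x ++ PySem.Int.toStr (N : Int)) := by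
          by_cases h1 : N = 1
          · rw [h1]
            simp [String.append_empty]
          · have h2 : 1 < N := by omega
            rw [if_pos h2, show (N == 1) = false by simp [h1], if_neg (by simp)]
            exact String.append_assoc
        rw [acc_lemma]
        simp only [List.singleton_append]
        rw [join_cons]
        by_cases hcc : c + 1 < col
        · rw [if_neg (by omega : ¬ c + 1 ≥ col), if_pos hcc]
          rw [ih r (c + 1) _ _ _ hcc hr (by omega) hs' hrel']
          rw [hpiece, String.append_assoc]
        · rw [if_pos (by omega : c + 1 ≥ col), if_neg hcc]
          have h2 : (r + 1) * col = r * col + col := by ring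
          rw [ih (r + 1) 0 _ _ _ (by omega) (by omega) (by omega) hs' hrel']
          rw [hpiece, String.append_assoc]
    · rw [restFrom, dif_neg hrow]
      simp only [List.foldl_nil, join_nil, String.append_empty, aLoop]
      rw [if_neg hrow]

-- ===== VERDICT (by name: the statement is the Claim_ definition above) =====
theorem solution_spec : Claim_equal_solution := by
  unfold Claim_equal_solution
  intro grid _hdom hpre
  obtain ⟨hne, hcol, _hrows⟩ := hpre
  have hrow : 0 < grid.length := List.length_pos_of_ne_nil hne
  unfold Spec_solution solution solution_alt
  have hshape : Shape grid.length (grid.headD []).length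
      (List.replicate grid.length (List.replicate (grid.headD []).length false)) := by
    constructor
    · exact List.length_replicate
    · intro i hi
      rw [List.getD_replicate _ hi]
      exact List.length_replicate
  have hrelinit : ChkRel
      (List.replicate grid.length (List.replicate (grid.headD []).length false))
      PySem.Set.empty := by
    intro i j
    have hfalse : PySem.Set.contains (PySem.Set.empty) (i, j) = false := rfl
    rw [hfalse]
    simp only [getD2]
    by_cases hi : i < grid.length
    · rw [List.getD_replicate _ hi]
      by_cases hj : j < (grid.headD []).length
      · rw [List.getD_replicate _ hj]
      · rw [List.getD_eq_default _ _ (by rw [List.length_replicate]; omega)]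
    · rw [List.getD_eq_default
        (l := List.replicate grid.length (List.replicate (grid.headD []).length false))
        (d := ([] : List Bool)) (by rw [List.length_replicate]; omega)]
      rfl
  rw [main_lemma grid grid.length (grid.headD []).length
    (grid.length * (grid.headD []).length + 1) 0 0 _ _ "" hcol (Nat.zero_le _)
    (by rw [Nat.zero_mul]; omega) hshape hrelinit]
  rw [String.empty_append]
  rw [restFrom_flat grid.length (grid.headD []).length grid.length 0 (by omega),
    ← List.range_eq_range']
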